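-- pv_equiv track=rewrite | github.com/yps1978/yps1978 | dev/greedy/seating_arrangments.py | minOverallAwkwardness
-- ===== SOURCE A (Python) =====
-- def minOverallAwkwardness(arr):
--     sorted_arr = sorted(arr)
--
--     min_awk = 0
--     last_left = last_right = sorted_arr[0]
--
--     for i in range(1, len(arr)):
--         if i % 2 == 0:
--             right_diff = abs(sorted_arr[i] - last_right)
--             min_awk = max(right_diff, min_awk)
--             last_right = sorted_arr[i]
--         else:
--             left_diff = abs(sorted_arr[i] - last_left)
--             min_awk = max(left_diff, min_awk)
--             last_left = sorted_arr[i]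
--
--     return min_awk
-- ===== SOURCE B (Python) =====
-- def _chainGap(chain):
--     return max((b - a for a, b in zip(chain, chain[1:])), default=0)
--
--
-- def minOverallAwkwardness(arr):
--     # Build the actual circular seating: one side takes every other sorted guest,
--     # the other side the rest; answer is the worst neighbour gap on either side
--     # or across the head of the table.
--     s = sorted(arr)
--     left, right = s[0::2], s[1::2]
--     bridge = right[0] - left[0] if right else 0
--     return max(_chainGap(left), _chainGap(right), bridge)
-- ===== Notes on version B (the rewrite author's own statement) =====
-- stated objective: simpler
-- what changed: Instead of A's single zigzag loop with a parity branch and mutable last_left/last_right trackers, B constructs the two seating sides explicitly as the even-index and odd-index interleaved slices of the sorted list and returns the max of each side's worst adjacent gap (zip of a chain with its own tail) and the bridging first gap.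
import Mathlib
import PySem

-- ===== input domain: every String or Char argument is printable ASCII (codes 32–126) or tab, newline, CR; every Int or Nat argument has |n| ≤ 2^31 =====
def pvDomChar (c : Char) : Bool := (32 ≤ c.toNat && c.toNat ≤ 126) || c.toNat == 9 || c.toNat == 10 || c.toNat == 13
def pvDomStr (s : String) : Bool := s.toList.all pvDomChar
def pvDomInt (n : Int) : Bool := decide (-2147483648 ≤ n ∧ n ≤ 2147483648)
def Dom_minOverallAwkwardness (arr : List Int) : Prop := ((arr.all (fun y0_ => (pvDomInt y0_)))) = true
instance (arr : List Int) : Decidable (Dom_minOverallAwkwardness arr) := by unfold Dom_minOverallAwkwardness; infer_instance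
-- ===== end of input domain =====

-- B rebuilds the actual seating: it splits the sorted list into the two alternating side
-- chains (even-index and odd-index slices) and takes the worst adjacent gap within each chain plus the
-- bridging first gap (simpler: no parity branch, no running last_left/last_right state);
-- on the empty list A raises IndexError while B returns 0 (that input is excluded by Pre_).


-- ===== PORT A =====
-- one iteration of A's for-loop; state = (min_awk, last_left, last_right)
def aStep (s : List Int) (st : Int × Int × Int) (i : Int) : Int × Int × Int :=
  if i % 2 == 0 then
    (max |PySem.List.pyGetD s i 0 - st.2.2| st.1, st.2.1, PySem.List.pyGetD s i 0)
  else
    (max |PySem.List.pyGetD s i 0 - st.2.1| st.1, PySem.List.pyGetD s i 0, st.2.2)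

def minOverallAwkwardness (arr : List Int) : Int :=
  let s := PySem.List.sorted arr (fun x => x) false
  let first := PySem.List.pyGetD s 0 0   -- the first sorted element; raises on the empty list (excluded by Pre_)
  ((PySem.List.pyRange 1 (arr.length : Int) 1).foldl (aStep s) (0, first, first)).1

-- ===== PORT B =====
-- max((b - a for a, b in zip(chain, chain[1:])), default=0)
def chainGap (chain : List Int) : Int :=
  match (chain.zip (PySem.List.slice chain (some 1) none)).map (fun p => p.2 - p.1) with
  | [] => 0
  | d :: rest => rest.foldl max d

def minOverallAwkwardness_alt (arr : List Int) : Int :=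
  let s := PySem.List.sorted arr (fun x => x) false
  let left := (PySem.List.slice? s (some 0) none 2).getD []    -- s[0::2]; step ≠ 0, so slice? is always `some`
  let right := (PySem.List.slice? s (some 1) none 2).getD []   -- s[1::2]
  -- Python indexes the heads of right and left: in range whenever right is nonempty (left is at least as long), so pyGetD is exact here
  let bridge := if right ≠ [] then PySem.List.pyGetD right 0 0 - PySem.List.pyGetD left 0 0 else 0
  max (max (chainGap left) (chainGap right)) bridge

-- ===== PRECONDITION & SPEC =====
-- Pre_ excludes only the empty list, on which A raises IndexError reading the first sorted element.
def Pre_minOverallAwkwardness (arr : List Int) : Prop := arr ≠ []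
instance (arr : List Int) : Decidable (Pre_minOverallAwkwardness arr) := by unfold Pre_minOverallAwkwardness; infer_instance
def pvWitness_minOverallAwkwardness : List Int := [3, 1, 2]

def Spec_minOverallAwkwardness (arr : List Int) (out : Int) : Prop := out = minOverallAwkwardness_alt arr
instance (arr : List Int) (out : Int) : Decidable (Spec_minOverallAwkwardness arr out) := by unfold Spec_minOverallAwkwardness; infer_instance

-- ===== CLAIM (what is proved, stated in full; the proofs are below) =====
def Claim_equal_minOverallAwkwardness : Prop := ∀ (arr : List Int), Dom_minOverallAwkwardness arr → Pre_minOverallAwkwardness arr → Spec_minOverallAwkwardness arr (minOverallAwkwardness arr)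

-- ===== LEMMAS AND PROOFS =====

-- element i of s (Nat index, default 0)
def pvD (s : List Int) (i : Nat) : Int := s.getD i 0
-- the gap A compares at step i: element i minus element i-2 in absolute value (step 1 compares against element 0)
def pvG (s : List Int) (i : Nat) : Int := |pvD s i - pvD s (i - 2)|
-- running max of the gaps for steps 1..k
def pvM (s : List Int) (k : Nat) : Int := ((List.range k).map (fun j => pvG s (j + 1))).foldl max 0

lemma loopA_inv (s : List Int) (k : Nat) :
    (PySem.List.pyRange 1 ((k : Int) + 1) 1).foldl (aStep s) (0, pvD s 0, pvD s 0)
      = (pvM s k, pvD s (if k % 2 = 1 then k else k - 1), pvD s (k - k % 2)) := by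
  induction k with
  | zero =>
      simp [PySem.List.pyRange_one_eq_nil, pvM]
  | succ k ih =>
      have hsplit : PySem.List.pyRange 1 (((k + 1 : Nat) : Int) + 1) 1
          = PySem.List.pyRange 1 ((k : Int) + 1) 1 ++ [(k : Int) + 1] := by
        have h : (((k + 1 : Nat) : Int) + 1) = ((k : Int) + 1) + 1 := by push_cast; ring
        rw [h, PySem.List.pyRange_one_succ_right (by omega)]
      rw [hsplit, List.foldl_append, ih]
      have hget : PySem.List.pyGetD s ((k : Int) + 1) 0 = pvD s (k + 1) := by
        have h : ((k : Int) + 1) = ((k + 1 : Nat) : Int) := by push_cast; ring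
        rw [h, PySem.List.pyGetD_natCast]; rfl
      have hM : pvM s (k + 1) = max (pvM s k) (pvG s (k + 1)) := by
        simp [pvM, List.range_succ]
      have hg : pvG s (k + 1) = |pvD s (k + 1) - pvD s (k - 1)| := by
        have e : k + 1 - 2 = k - 1 := by omega
        rw [pvG, e]
      rcases Nat.mod_two_eq_zero_or_one k with hk | hk
      · -- k even, so the step index k+1 is odd: else branch of aStep
        have hmod : ((k : Int) + 1) % 2 = 1 := by omega
        have hi2 : (if k % 2 = 1 then k else k - 1) = k - 1 := by simp [hk]
        have hi3 : k - k % 2 = k := by omega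
        have hk1 : (k + 1) % 2 = 1 := by omega
        simp only [hi2, hi3, hk1, hM, hg]
        simp [aStep, hmod, hget, max_comm]
      · -- k odd, so the step index k+1 is even: then branch of aStep
        have hmod : ((k : Int) + 1) % 2 = 0 := by omega
        have hi2 : (if k % 2 = 1 then k else k - 1) = k := by simp [hk]
        have hi3 : k - k % 2 = k - 1 := by omega
        have hk1 : (k + 1) % 2 = 0 := by omega
        have hj2 : (k + 1) - 1 = k := by omega
        simp only [hi2, hi3, hk1, hj2, hM, hg]
        simp [aStep, hmod, hget, max_comm]

lemma A_eq_pvM (arr : List Int) (h : arr ≠ []) :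
    minOverallAwkwardness arr
      = pvM (PySem.List.sorted arr (fun x => x) false) (arr.length - 1) := by
  unfold minOverallAwkwardness
  dsimp only
  set s := PySem.List.sorted arr (fun x => x) false with hs
  have hfirst : PySem.List.pyGetD s 0 0 = pvD s 0 := by
    simp [PySem.List.pyGetD_ofNat', pvD]
  obtain ⟨m, hm⟩ : ∃ m, arr.length = m + 1 := by
    cases arr with
    | nil => exact absurd rfl h
    | cons a t => exact ⟨t.length, rfl⟩
  rw [hfirst, hm]
  have hcast : ((m + 1 : Nat) : Int) = (m : Int) + 1 := by push_cast; ring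
  rw [hcast, loopA_inv]
  simp

-- B-side helpers: filterMap over a range of in-bounds indices is a map
lemma filterMap_eq_map_of {α : Type} (l : List Nat) (f : Nat → Option α) (g : Nat → α)
    (h : ∀ x ∈ l, f x = some (g x)) : l.filterMap f = l.map g := by
  induction l with
  | nil => simp
  | cons a t ih =>
      simp only [List.filterMap_cons, h a (by simp), List.map_cons]
      rw [ih (fun x hx => h x (by simp [hx]))]

-- s[0::2] is the list of elements at even indices
lemma left_eq (s : List Int) :
    (PySem.List.slice? s (some 0) none 2).getD []
      = (List.range ((s.length + 1) / 2)).map (fun k => s.getD (2 * k) 0) := by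
  simp only [PySem.List.slice?, PySem.List.sliceIndices]
  norm_num
  have hc : (if 0 < s.length then (((s.length : Int) + 2 - 1) / 2).toNat else 0)
      = (s.length + 1) / 2 := by split <;> omega
  rw [hc]
  refine filterMap_eq_map_of _ _ _ ?_
  intro x hx
  have hx' : x < (s.length + 1) / 2 := List.mem_range.mp hx
  have hlt : 2 * x < s.length := by omega
  have ht : (2 * (x : Int)).toNat = 2 * x := by omega
  rw [ht, List.getElem?_eq_getElem hlt]
  simp

-- s[1::2] is the list of elements at odd indices
lemma right_eq (s : List Int) :
    (PySem.List.slice? s (some 1) none 2).getD []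
      = (List.range (s.length / 2)).map (fun k => s.getD (2 * k + 1) 0) := by
  simp only [PySem.List.slice?, PySem.List.sliceIndices]
  norm_num
  rcases Nat.eq_zero_or_pos s.length with h0 | h1
  · rw [List.eq_nil_of_length_eq_zero h0]; simp
  · have hmin : min (1 : Int) (s.length : Int) = 1 := by omega
    rw [hmin]
    have hc : (if 1 < s.length then (((s.length : Int) - 1 + 2 - 1) / 2).toNat else 0)
        = s.length / 2 := by split <;> omega
    rw [hc]
    refine filterMap_eq_map_of _ _ _ ?_
    intro x hx
    have hx' : x < s.length / 2 := List.mem_range.mp hx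
    have hlt : 2 * x + 1 < s.length := by omega
    have ht : ((1 : Int) + 2 * (x : Int)).toNat = 2 * x + 1 := by omega
    rw [ht, List.getElem?_eq_getElem hlt]
    simp

lemma foldl_max_shift (l : List Int) : ∀ a b : Int, l.foldl max (max a b) = max a (l.foldl max b) := by
  induction l with
  | nil => intro a b; simp
  | cons x t ih =>
      intro a b
      simp only [List.foldl_cons]
      rw [max_assoc, ih]

lemma le_foldl_max (l : List Int) : ∀ a : Int, a ≤ l.foldl max a := by
  induction l with
  | nil => intro a; simp
  | cons x t ih => intro a; simpa using le_trans (le_max_left a x) (ih (max a x))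

lemma foldl_max_append (l1 l2 : List Int) :
    (l1 ++ l2).foldl max 0 = max (l1.foldl max 0) (l2.foldl max 0) := by
  rw [List.foldl_append]
  have e : l1.foldl max 0 = max (l1.foldl max 0) 0 := (max_eq_left (le_foldl_max l1 0)).symm
  conv_lhs => rw [e]
  rw [foldl_max_shift]

-- zip-with-tail differences, by index
lemma diffs_eq (c : List Int) :
    (c.zip (PySem.List.slice c (some 1) none)).map (fun p => p.2 - p.1)
      = (List.range (c.length - 1)).map (fun j => c.getD (j + 1) 0 - c.getD j 0) := by
  rw [PySem.List.slice_from_one]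
  apply List.ext_getElem
  · simp [List.length_zip]
  · intro i h1 h2
    have hlen : (c.zip c.tail).length = c.length - 1 := by simp [List.length_zip]
    have hi : i < (c.zip c.tail).length := by simpa [List.length_map] using h1
    have hi1 : i + 1 < c.length := by omega
    have hi0 : i < c.length := by omega
    simp [List.getElem_zip, List.getElem_tail, List.getD, List.getElem?_eq_getElem hi1,
      List.getElem?_eq_getElem hi0]

lemma chainGap_eq_fold (c : List Int)
    (h : ∀ d ∈ (List.range (c.length - 1)).map (fun j => c.getD (j + 1) 0 - c.getD j 0), 0 ≤ d) :
    chainGap c = ((List.range (c.length - 1)).map (fun j => c.getD (j + 1) 0 - c.getD j 0)).foldl max 0 := by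
  unfold chainGap
  rw [diffs_eq]
  cases hd : (List.range (c.length - 1)).map (fun j => c.getD (j + 1) 0 - c.getD j 0) with
  | nil => simp
  | cons d rest =>
      have hd0 : 0 ≤ d := h d (by rw [hd]; simp)
      simp only [List.foldl_cons]
      rw [max_eq_right hd0]

-- the seating's gap indices (even chain, odd chain, bridge) are a permutation of 1..n-1
lemma idx_perm (n : Nat) (hn : 2 ≤ n) :
    ((List.range ((n + 1) / 2 - 1)).map (fun j => 2 * j + 2)
      ++ (List.range (n / 2 - 1)).map (fun j => 2 * j + 3) ++ [1]).Perm
      ((List.range (n - 1)).map (fun j => j + 1)) := by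
  have hinj2 : Function.Injective (fun j : Nat => 2 * j + 2) := fun a b h => by
    have h' : 2 * a + 2 = 2 * b + 2 := h
    omega
  have hinj3 : Function.Injective (fun j : Nat => 2 * j + 3) := fun a b h => by
    have h' : 2 * a + 3 = 2 * b + 3 := h
    omega
  have hinj1 : Function.Injective (fun j : Nat => j + 1) := fun a b h => by
    have h' : a + 1 = b + 1 := h
    omega
  have hev : ((List.range ((n + 1) / 2 - 1)).map (fun j => 2 * j + 2)).Nodup :=
    List.Nodup.map hinj2 List.nodup_range
  have hod : ((List.range (n / 2 - 1)).map (fun j => 2 * j + 3)).Nodup :=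
    List.Nodup.map hinj3 List.nodup_range
  have hL : ((List.range ((n + 1) / 2 - 1)).map (fun j => 2 * j + 2)
      ++ (List.range (n / 2 - 1)).map (fun j => 2 * j + 3) ++ [1]).Nodup := by
    simp [List.nodup_append, hev, hod]
    rintro a ha b (⟨c, hc, rfl⟩ | rfl) <;> omega
  have hR : ((List.range (n - 1)).map (fun j => j + 1)).Nodup :=
    List.Nodup.map hinj1 List.nodup_range
  rw [List.perm_ext_iff_of_nodup hL hR]
  intro a
  simp only [List.mem_append, List.mem_map, List.mem_range, List.mem_singleton]
  constructor
  · rintro ((⟨j, hj, rfl⟩ | ⟨j, hj, rfl⟩) | rfl)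
    · exact ⟨2 * j + 1, by omega, by omega⟩
    · exact ⟨2 * j + 2, by omega, by omega⟩
    · exact ⟨0, by omega, by omega⟩
  · rintro ⟨j, hj, rfl⟩
    rcases Nat.even_or_odd j with ⟨c, hc⟩ | ⟨c, hc⟩
    · rcases Nat.eq_zero_or_pos c with rfl | hc1
      · right; omega
      · left; right; exact ⟨c - 1, by omega, by omega⟩
    · left; left; exact ⟨c, by omega, by omega⟩

lemma alt_eq_pvM (arr : List Int) (h : arr ≠ []) :
    minOverallAwkwardness_alt arr
      = pvM (PySem.List.sorted arr (fun x => x) false) (arr.length - 1) := by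
  unfold minOverallAwkwardness_alt
  dsimp only
  have hlen : (PySem.List.sorted arr (fun x => x) false).length = arr.length :=
    PySem.List.length_sorted arr (fun x => x) false
  set s := PySem.List.sorted arr (fun x => x) false with hs
  have hn : 1 ≤ arr.length := List.length_pos_iff.mpr h
  set n := arr.length with hnn
  have hpw : List.Pairwise (· ≤ ·) s := by
    have := PySem.List.sorted_pairwise arr (fun x => x)
    simpa using this
  have hmono : ∀ i j : Nat, i ≤ j → j < n → s.getD i 0 ≤ s.getD j 0 := by
    intro i j hij hj
    rcases Nat.eq_or_lt_of_le hij with rfl | hlt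
    · exact le_refl _
    · have hj' : j < s.length := by omega
      have hi' : i < s.length := by omega
      have := (List.pairwise_iff_getElem.mp hpw) i j hi' hj' hlt
      rw [List.getD_eq_getElem _ _ hi', List.getD_eq_getElem _ _ hj']
      exact this
  rw [left_eq, right_eq, hlen]
  set L := (n + 1) / 2 with hL
  set R := n / 2 with hR
  have hlenL : ((List.range L).map (fun k => s.getD (2 * k) 0)).length = L := by simp
  have hlenR : ((List.range R).map (fun k => s.getD (2 * k + 1) 0)).length = R := by simp
  have hgetL : ∀ j < L, ((List.range L).map (fun k => s.getD (2 * k) 0)).getD j 0 = s.getD (2 * j) 0 :=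
    fun j hj => PySem.List.getD_map_range _ _ _ _ hj
  have hgetR : ∀ j < R, ((List.range R).map (fun k => s.getD (2 * k + 1) 0)).getD j 0 = s.getD (2 * j + 1) 0 :=
    fun j hj => PySem.List.getD_map_range _ _ _ _ hj
  have hdiffL : (List.range (((List.range L).map (fun k => s.getD (2 * k) 0)).length - 1)).map
      (fun j => ((List.range L).map (fun k => s.getD (2 * k) 0)).getD (j + 1) 0
        - ((List.range L).map (fun k => s.getD (2 * k) 0)).getD j 0)
      = (List.range (L - 1)).map (fun j => pvG s (2 * j + 2)) := by
    rw [hlenL]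
    refine List.map_congr_left ?_
    intro j hj
    have hj' : j < L - 1 := List.mem_range.mp hj
    rw [hgetL (j + 1) (by omega), hgetL j (by omega)]
    have h2 : 2 * (j + 1) = 2 * j + 2 := by ring
    rw [h2]
    have hnn2 : 2 * j + 2 < n := by omega
    have hmn := hmono (2 * j) (2 * j + 2) (by omega) hnn2
    simp only [pvG, pvD]
    have e : 2 * j + 2 - 2 = 2 * j := by omega
    rw [e, abs_of_nonneg (by omega)]
  have hdiffR : (List.range (((List.range R).map (fun k => s.getD (2 * k + 1) 0)).length - 1)).map
      (fun j => ((List.range R).map (fun k => s.getD (2 * k + 1) 0)).getD (j + 1) 0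
        - ((List.range R).map (fun k => s.getD (2 * k + 1) 0)).getD j 0)
      = (List.range (R - 1)).map (fun j => pvG s (2 * j + 3)) := by
    rw [hlenR]
    refine List.map_congr_left ?_
    intro j hj
    have hj' : j < R - 1 := List.mem_range.mp hj
    rw [hgetR (j + 1) (by omega), hgetR j (by omega)]
    have h2 : 2 * (j + 1) + 1 = 2 * j + 3 := by ring
    rw [h2]
    have hnn2 : 2 * j + 3 < n := by omega
    have hmn := hmono (2 * j + 1) (2 * j + 3) (by omega) hnn2
    simp only [pvG, pvD]
    have e : 2 * j + 3 - 2 = 2 * j + 1 := by omega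
    rw [e, abs_of_nonneg (by omega)]
  have hCGL : chainGap ((List.range L).map (fun k => s.getD (2 * k) 0))
      = ((List.range (L - 1)).map (fun j => pvG s (2 * j + 2))).foldl max 0 := by
    rw [chainGap_eq_fold, hdiffL]
    rw [hdiffL]
    intro d hd
    rcases List.mem_map.mp hd with ⟨j, hj, rfl⟩
    exact abs_nonneg _
  have hCGR : chainGap ((List.range R).map (fun k => s.getD (2 * k + 1) 0))
      = ((List.range (R - 1)).map (fun j => pvG s (2 * j + 3))).foldl max 0 := by
    rw [chainGap_eq_fold, hdiffR]
    rw [hdiffR]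
    intro d hd
    rcases List.mem_map.mp hd with ⟨j, hj, rfl⟩
    exact abs_nonneg _
  rw [hCGL, hCGR]
  by_cases h2 : 2 ≤ n
  · have hne : ((List.range R).map (fun k => s.getD (2 * k + 1) 0)) ≠ [] := by
      intro hE
      have := congrArg List.length hE
      simp at this
      omega
    rw [if_pos hne]
    have hb : PySem.List.pyGetD ((List.range R).map (fun k => s.getD (2 * k + 1) 0)) 0 0
        - PySem.List.pyGetD ((List.range L).map (fun k => s.getD (2 * k) 0)) 0 0 = pvG s 1 := by
      rw [PySem.List.pyGetD_ofNat', PySem.List.pyGetD_ofNat',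
        hgetR 0 (by omega), hgetL 0 (by omega)]
      have hmn := hmono 0 1 (by omega) (by omega)
      have hgv : pvG s 1 = |s.getD 1 0 - s.getD 0 0| := rfl
      show s.getD 1 0 - s.getD 0 0 = pvG s 1
      rw [hgv, abs_of_nonneg (by omega)]
    rw [hb]
    have hsingle : ([pvG s 1]).foldl max 0 = pvG s 1 := by
      simp only [List.foldl_cons, List.foldl_nil]
      have hnn0 : (0 : Int) ≤ pvG s 1 := by rw [pvG]; exact abs_nonneg _
      omega
    rw [← hsingle]
    have hmapsingle : [pvG s 1] = ([1].map (pvG s)) := rfl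
    rw [hmapsingle]
    have hevens : (List.range (L - 1)).map (fun j => pvG s (2 * j + 2))
        = ((List.range (L - 1)).map (fun j => 2 * j + 2)).map (pvG s) := by
      rw [List.map_map]; rfl
    have hodds : (List.range (R - 1)).map (fun j => pvG s (2 * j + 3))
        = ((List.range (R - 1)).map (fun j => 2 * j + 3)).map (pvG s) := by
      rw [List.map_map]; rfl
    rw [hevens, hodds, ← foldl_max_append, ← foldl_max_append, ← List.map_append, ← List.map_append]
    have hperm := (idx_perm n h2).map (pvG s)
    rw [hperm.foldl_eq 0]
    simp only [pvM, List.map_map]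
    rfl
  · have hn1 : n = 1 := by omega
    have hR0 : R = 0 := by omega
    have hL1 : L = 1 := by omega
    rw [hR0, hL1]
    simp [pvM, hn1]

-- ===== VERDICT (by name: the statement is the Claim_ definition above) =====
theorem minOverallAwkwardness_spec : Claim_equal_minOverallAwkwardness := by
  intro arr _ hpre
  unfold Spec_minOverallAwkwardness
  rw [A_eq_pvM arr hpre, alt_eq_pvM arr hpre]
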